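-- pv_equiv track=rewrite | github.com/mirqtio/Anthrasite_LeadFactory | leadfactory/config/json_retention_policy.py | _should_preserve_field
-- ===== SOURCE A (Python) =====
-- from typing import Any, Dict, List, Optional, Set
--
-- def _should_preserve_field(
--     field_path: str, preserve_fields: Set[str]
-- ) -> bool:
--     """Check if a field path should be preserved."""
--     # Exact match
--     if field_path in preserve_fields:
--         return True
--
--     # Check for partial matches (e.g., "location" preserves "location.zip_code")
--     for preserve_pattern in preserve_fields:
--         if field_path.startswith(preserve_pattern + "."):
--             return True
--         if preserve_pattern.startswith(field_path + "."):
--             return True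
--
--     return False
-- ===== SOURCE B (Python) =====
-- def _should_preserve_field(field_path, preserve_fields):
--     """Check if a field path should be preserved."""
--     # A preserved field is an ancestor of field_path (dot-boundary prefix) ...
--     for i, ch in enumerate(field_path):
--         if ch == "." and field_path[:i] in preserve_fields:
--             return True
--     # ... or field_path itself ...
--     if field_path in preserve_fields:
--         return True
--     # ... or field_path is a strict ancestor of some preserved pattern.
--     dotted = field_path + "."
--     return any(p.startswith(dotted) for p in preserve_fields)
-- ===== Notes on version B (the rewrite author's own statement) =====
-- stated objective: faster
-- what changed: Instead of scanning every preserve pattern and testing field_path against it both ways with startswith, B walks the dot-boundary prefixes of field_path itself with one O(1) set-membership test per dot, keeping only a single startswith scan for patterns strictly below field_path.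
import Mathlib
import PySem

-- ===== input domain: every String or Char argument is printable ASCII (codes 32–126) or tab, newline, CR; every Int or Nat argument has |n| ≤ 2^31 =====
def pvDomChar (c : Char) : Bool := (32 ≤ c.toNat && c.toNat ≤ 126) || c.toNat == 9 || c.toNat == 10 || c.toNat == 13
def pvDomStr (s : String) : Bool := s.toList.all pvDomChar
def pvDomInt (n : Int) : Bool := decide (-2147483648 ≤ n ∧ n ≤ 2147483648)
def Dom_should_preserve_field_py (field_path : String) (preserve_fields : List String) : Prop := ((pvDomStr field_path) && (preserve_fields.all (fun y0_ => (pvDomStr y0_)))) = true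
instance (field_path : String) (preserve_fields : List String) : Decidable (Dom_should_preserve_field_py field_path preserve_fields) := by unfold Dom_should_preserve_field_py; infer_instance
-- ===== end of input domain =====

-- B walks the dot-boundary prefixes of field_path with one set-lookup each instead of
-- testing field_path against every pattern both ways; objective: alternative decomposition.

-- ===== PORT A =====
def should_preserve_field_py (field_path : String) (preserve_fields : List String) : Bool :=
  -- if field_path in preserve_fields: return True
  if preserve_fields.contains field_path then true
  else
    -- for preserve_pattern in preserve_fields: two startswith tests, return True on first hit
    preserve_fields.any (fun preserve_pattern =>
      PySem.Str.startswith field_path (preserve_pattern ++ ".") ||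
      PySem.Str.startswith preserve_pattern (field_path ++ "."))

-- ===== PORT B =====
def should_preserve_field_py_alt (field_path : String) (preserve_fields : List String) : Bool :=
  let cs := field_path.toList
  -- for i, ch in enumerate(field_path): if ch == "." and field_path[:i] in preserve_fields: return True
  if (PySem.List.enumerate cs).any (fun ic =>
      ic.2 == '.' && preserve_fields.contains (String.ofList (PySem.List.slice cs none (some ic.1)))) then
    true
  -- if field_path in preserve_fields: return True
  else if preserve_fields.contains field_path then true
  -- return any(p.startswith(dotted) for p in preserve_fields)
  else preserve_fields.any (fun p => PySem.Str.startswith p (field_path ++ "."))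

-- ===== PRECONDITION & SPEC =====
def Spec_should_preserve_field_py (field_path : String) (preserve_fields : List String) (out : Bool) : Prop := out = should_preserve_field_py_alt field_path preserve_fields
instance (field_path : String) (preserve_fields : List String) (out : Bool) : Decidable (Spec_should_preserve_field_py field_path preserve_fields out) := by unfold Spec_should_preserve_field_py; infer_instance

-- ===== CLAIM (what is proved, stated in full; the proofs are below) =====
def Claim_equal_should_preserve_field_py : Prop := ∀ (field_path : String) (preserve_fields : List String), Dom_should_preserve_field_py field_path preserve_fields → Spec_should_preserve_field_py field_path preserve_fields (should_preserve_field_py field_path preserve_fields)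

-- ===== LEMMAS AND PROOFS =====

-- `p` followed by a dot is a prefix of `cs` exactly when `p` is what stands before some dot of `cs`.
theorem dot_prefix_iff (cs l : List Char) :
    (l ++ ['.']) <+: cs ↔ ∃ k, ∃ h : k < cs.length, cs[k] = '.' ∧ l = cs.take k := by
  constructor
  · rintro ⟨t, ht⟩
    refine ⟨l.length, by simp [← ht], ?_, ?_⟩
    · simp [← ht]
    · simp [← ht]
  · rintro ⟨k, h, hdot, rfl⟩
    refine ⟨cs.drop (k + 1), ?_⟩
    calc cs.take k ++ ['.'] ++ cs.drop (k + 1)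
        = cs.take k ++ (cs[k] :: cs.drop (k + 1)) := by simp [hdot]
      _ = cs.take k ++ cs.drop k := by rw [List.getElem_cons_drop]
      _ = cs := List.take_append_drop k cs

-- A's forward startswith scan agrees with B's walk over the dot positions of field_path.
theorem scan_iff_walk (cs : List Char) (pfs : List String) :
    (∃ p ∈ pfs, (p.toList ++ ['.']) <+: cs) ↔
    (∃ k, ∃ h : k < cs.length, cs[k] = '.' ∧ String.ofList (cs.take k) ∈ pfs) := by
  constructor
  · rintro ⟨p, hp, hpre⟩
    obtain ⟨k, h, hdot, hl⟩ := (dot_prefix_iff cs p.toList).mp hpre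
    exact ⟨k, h, hdot, by simpa [← hl] using hp⟩
  · rintro ⟨k, h, hdot, hmem⟩
    refine ⟨String.ofList (cs.take k), hmem, (dot_prefix_iff cs _).mpr ⟨k, h, hdot, by simp⟩⟩

-- ===== VERDICT (by name: the statement is the Claim_ definition above) =====
set_option maxHeartbeats 1600000 in
theorem should_preserve_field_py_spec : Claim_equal_should_preserve_field_py := by
  intro field_path preserve_fields _
  unfold Spec_should_preserve_field_py
  rw [Bool.eq_iff_iff]
  have hA : should_preserve_field_py field_path preserve_fields = true ↔
      field_path ∈ preserve_fields ∨ ∃ p ∈ preserve_fields,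
        ((p.toList ++ ['.']) <+: field_path.toList ∨ (field_path.toList ++ ['.']) <+: p.toList) := by
    unfold should_preserve_field_py
    split_ifs with h <;>
      simp_all [List.any_eq_true, PySem.Chars.startswith_iff]
  have hB : should_preserve_field_py_alt field_path preserve_fields = true ↔
      (∃ k, ∃ h : k < field_path.toList.length, field_path.toList[k] = '.' ∧
          String.ofList (field_path.toList.take k) ∈ preserve_fields) ∨
        field_path ∈ preserve_fields ∨
          ∃ p ∈ preserve_fields, (field_path.toList ++ ['.']) <+: p.toList := by
    unfold should_preserve_field_py_alt
    split_ifs <;>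
      simp_all [List.any_eq_true, PySem.List.mem_enumerate_iff, PySem.List.slice_to_natCast,
        PySem.Chars.startswith_iff, zero_add]
  rw [hA, hB, ← scan_iff_walk field_path.toList preserve_fields]
  constructor
  · rintro (h | ⟨p, hp, hpq | hpq⟩)
    · exact Or.inr (Or.inl h)
    · exact Or.inl ⟨p, hp, hpq⟩
    · exact Or.inr (Or.inr ⟨p, hp, hpq⟩)
  · rintro (⟨p, hp, hpq⟩ | h | ⟨p, hp, hpq⟩)
    · exact Or.inr ⟨p, hp, Or.inl hpq⟩
    · exact Or.inl h
    · exact Or.inr ⟨p, hp, Or.inr hpq⟩
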